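-- pv_equiv track=rewrite | github.com/pypi-data/pypi-mirror-369 | packages/abdpymc/abdpymc-1.0.4.tar.gz/abdpymc-1.0.4/abdpymc/plotting.py | overhanging_slice
-- ===== SOURCE A (Python) =====
-- from typing import Iterable, Literal, Optional
--
-- def overhanging_slice(values: Iterable, center: int, pad: float, fill=None) -> tuple:
--     values = tuple(values)
--
--     if center < 0:
--         raise ValueError("center must be positive")
--
--     if center > len(values):
--         raise ValueError("center must be less than or equal to length of values")
--
--     if pad < 0:
--         raise ValueError("pad < 0")
--
--     output = [fill] * (1 + 2 * pad)
--
--     for i_output, i_values in enumerate(range(center - pad, center + pad + 1)):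
--         if 0 <= i_values < len(values):
--             output[i_output] = values[i_values]
--
--     return tuple(output)
-- ===== SOURCE B (Python) =====
-- def overhanging_slice(values, center, pad, fill=None):
--     values = tuple(values)
--
--     if center < 0:
--         raise ValueError("center must be positive")
--
--     if center > len(values):
--         raise ValueError("center must be less than or equal to length of values")
--
--     if pad < 0:
--         raise ValueError("pad < 0")
--
--     lo, hi = center - pad, center + pad + 1
--     valid_lo, valid_hi = max(lo, 0), min(hi, len(values))
--     return (fill,) * (valid_lo - lo) + values[valid_lo:valid_hi] + (fill,) * (hi - valid_hi)
-- ===== Notes on version B (the rewrite author's own statement) =====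
-- stated objective: simpler
-- what changed: Replaced the preallocate-then-bounds-checked-per-slot write loop with a direct slice of the in-range part plus replicated fill padding on each edge.
import Mathlib
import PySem

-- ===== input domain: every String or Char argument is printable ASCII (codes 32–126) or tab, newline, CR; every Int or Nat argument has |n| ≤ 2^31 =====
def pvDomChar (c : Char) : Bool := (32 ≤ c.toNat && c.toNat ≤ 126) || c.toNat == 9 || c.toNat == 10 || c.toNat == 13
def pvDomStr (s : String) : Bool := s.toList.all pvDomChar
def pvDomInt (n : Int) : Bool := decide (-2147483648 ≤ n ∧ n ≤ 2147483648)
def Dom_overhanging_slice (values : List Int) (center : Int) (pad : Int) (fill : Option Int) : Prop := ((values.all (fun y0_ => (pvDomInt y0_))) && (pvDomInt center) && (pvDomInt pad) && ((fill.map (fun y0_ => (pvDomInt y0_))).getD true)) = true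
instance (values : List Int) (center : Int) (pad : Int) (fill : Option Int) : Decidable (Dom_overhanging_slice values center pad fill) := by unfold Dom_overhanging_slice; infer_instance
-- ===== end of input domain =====

-- B replaces A's preallocate-then-per-slot bounds-checked write loop by a slice of the
-- in-range part with replicated fill padding on each edge (simpler decomposition; same cost).


-- ===== PORT A =====
-- output = [fill] * (1 + 2*pad); for i_output, i_values in enumerate(range(center-pad, center+pad+1)):
--   if 0 <= i_values < len(values): output[i_output] = values[i_values]
def overhanging_slice (values : List Int) (center : Int) (pad : Int) (fill : Option Int) : List (Option Int) :=
  let output := List.replicate (1 + 2 * pad).toNat fill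
  (PySem.List.enumerate (PySem.List.pyRange (center - pad) (center + pad + 1) 1) 0).foldl
    (fun out p =>
      if 0 ≤ p.2 ∧ p.2 < (values.length : Int) then
        out.set p.1.toNat (some (PySem.List.pyGetD values p.2 0))
      else out) output

-- ===== PORT B =====
def overhanging_slice_alt (values : List Int) (center : Int) (pad : Int) (fill : Option Int) : List (Option Int) :=
  let lo := center - pad
  let hi := center + pad + 1
  let vlo := max lo 0
  let vhi := min hi (values.length : Int)
  List.replicate (vlo - lo).toNat fill
    ++ (PySem.List.slice values (some vlo) (some vhi)).map some
    ++ List.replicate (hi - vhi).toNat fill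

-- ===== PRECONDITION & SPEC =====
-- Pre_ excludes exactly the inputs where A raises ValueError: center < 0, center > len(values), pad < 0.
def Pre_overhanging_slice (values : List Int) (center : Int) (pad : Int) (fill : Option Int) : Prop :=
  0 ≤ center ∧ center ≤ (values.length : Int) ∧ 0 ≤ pad
instance (values : List Int) (center : Int) (pad : Int) (fill : Option Int) : Decidable (Pre_overhanging_slice values center pad fill) := by unfold Pre_overhanging_slice; infer_instance
def pvWitness_overhanging_slice : List Int × Int × Int × Option Int := ([1, 2, 3], 1, 2, none)

def Spec_overhanging_slice (values : List Int) (center : Int) (pad : Int) (fill : Option Int) (out : List (Option Int)) : Prop := out = overhanging_slice_alt values center pad fill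
instance (values : List Int) (center : Int) (pad : Int) (fill : Option Int) (out : List (Option Int)) : Decidable (Spec_overhanging_slice values center pad fill out) := by unfold Spec_overhanging_slice; infer_instance

-- ===== CLAIM (what is proved, stated in full; the proofs are below) =====
def Claim_equal_overhanging_slice : Prop := ∀ (values : List Int) (center : Int) (pad : Int) (fill : Option Int), Dom_overhanging_slice values center pad fill → Pre_overhanging_slice values center pad fill → Spec_overhanging_slice values center pad fill (overhanging_slice values center pad fill)

-- ===== LEMMAS AND PROOFS =====

-- value at absolute index i in the output window
def pvG (values : List Int) (fill : Option Int) (i : Int) : Option Int :=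
  if 0 ≤ i ∧ i < (values.length : Int) then some (PySem.List.pyGetD values i 0) else fill

lemma pv_foldA (values : List Int) (fill : Option Int) :
    ∀ (r : List Int) (pre : List (Option Int)),
      (PySem.List.enumerate r (pre.length : Int)).foldl
        (fun out p =>
          if 0 ≤ p.2 ∧ p.2 < (values.length : Int) then
            out.set p.1.toNat (some (PySem.List.pyGetD values p.2 0))
          else out)
        (pre ++ List.replicate r.length fill)
      = pre ++ r.map (pvG values fill) := by
  intro r
  induction r with
  | nil => intro pre; simp [PySem.List.enumerate_nil]
  | cons v r ih =>
    intro pre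
    rw [PySem.List.enumerate_cons]
    simp only [List.foldl_cons]
    have hstep :
        (if 0 ≤ v ∧ v < (values.length : Int) then
            (pre ++ List.replicate (v :: r).length fill).set ((pre.length : Int)).toNat
              (some (PySem.List.pyGetD values v 0))
          else pre ++ List.replicate (v :: r).length fill)
        = (pre ++ [pvG values fill v]) ++ List.replicate r.length fill := by
      simp only [List.length_cons, List.replicate_succ, pvG]
      by_cases h : 0 ≤ v ∧ v < (values.length : Int)
      · simp only [if_pos h, Int.toNat_natCast]
        rw [List.set_append_right _ _ (le_refl pre.length)]
        simp
      · simp [if_neg h]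
    rw [hstep]
    have : ((pre.length : Int) + 1) = (((pre ++ [pvG values fill v]).length : Nat) : Int) := by
      simp
    rw [this, ih (pre ++ [pvG values fill v])]
    simp

lemma pvA_eq_map (values : List Int) (center pad : Int) (fill : Option Int) :
    overhanging_slice values center pad fill
      = (PySem.List.pyRange (center - pad) (center + pad + 1) 1).map (pvG values fill) := by
  unfold overhanging_slice
  have hlen : (1 + 2 * pad).toNat
      = (PySem.List.pyRange (center - pad) (center + pad + 1) 1).length := by
    rw [PySem.List.length_pyRange_one]; omega
  have h := pv_foldA values fill (PySem.List.pyRange (center - pad) (center + pad + 1) 1) []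
  simpa [hlen] using h

lemma pv_map_replicate (fill : Option Int) (values : List Int) (r : List Int)
    (h : ∀ i ∈ r, ¬ (0 ≤ i ∧ i < (values.length : Int))) :
    r.map (pvG values fill) = List.replicate r.length fill := by
  rw [List.eq_replicate_iff]
  constructor
  · simp
  · intro b hb
    rcases List.mem_map.mp hb with ⟨i, hi, rfl⟩
    simp [pvG, if_neg (h i hi)]

lemma pv_map_middle (values : List Int) (fill : Option Int) (a b : Int)
    (ha : 0 ≤ a) (hab : a ≤ b) (hb : b ≤ (values.length : Int)) :
    (PySem.List.pyRange a b 1).map (pvG values fill)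
      = (PySem.List.slice values (some a) (some b)).map some := by
  rw [PySem.List.slice_toNat values ha (ha.trans hab)]
  apply List.ext_getElem
  · simp [PySem.List.length_pyRange_one]; omega
  · intro k h1 h2
    simp only [List.getElem_map, PySem.List.getElem_pyRange_one]
    have hk : (k : Int) < b - a := by
      simp [PySem.List.length_pyRange_one] at h1; omega
    have hcond : 0 ≤ a + (k : Int) ∧ a + (k : Int) < (values.length : Int) := by omega
    rw [pvG, if_pos hcond,
      PySem.List.pyGetD_eq_getElem values 0 hcond.1 hcond.2]
    simp only [List.getElem_take, List.getElem_drop]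
    have hidx : (a + (k : Int)).toNat = a.toNat + k := by omega
    simp [hidx]

-- ===== VERDICT (by name: the statement is the Claim_ definition above) =====
theorem overhanging_slice_spec : Claim_equal_overhanging_slice := by
  intro values center pad fill _ hpre
  obtain ⟨hc0, hcl, hp0⟩ := hpre
  show overhanging_slice values center pad fill = overhanging_slice_alt values center pad fill
  rw [pvA_eq_map]
  unfold overhanging_slice_alt
  set lo := center - pad with hlo
  set hi := center + pad + 1 with hhi
  have h1 : lo ≤ max lo 0 := le_max_left _ _
  have h2 : max lo 0 ≤ min hi (values.length : Int) := by omega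
  have h3 : min hi (values.length : Int) ≤ hi := min_le_left _ _
  rw [PySem.List.pyRange_one_append lo (max lo 0) hi h1 (le_trans h2 h3),
    PySem.List.pyRange_one_append (max lo 0) (min hi (values.length : Int)) hi h2 h3,
    List.map_append, List.map_append, List.append_assoc]
  congr 1
  · rw [pv_map_replicate fill values _ (by
      intro i hi'
      rw [PySem.List.mem_pyRange_one] at hi'
      omega)]
    congr 1
    rw [PySem.List.length_pyRange_one]
  congr 1
  · exact pv_map_middle values fill _ _ (le_max_right _ _) h2 (min_le_right _ _)
  · rw [pv_map_replicate fill values _ (by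
      intro i hi'
      rw [PySem.List.mem_pyRange_one] at hi'
      omega)]
    congr 1
    rw [PySem.List.length_pyRange_one]
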